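-- pv_equiv track=rewrite | github.com/AdnanKhurshid26/Computer-Networks-Lab | vrc/VRC.py | vrcdecode
-- ===== SOURCE A (Python) =====
-- def CountOnesZeros(input):
--     noOfZeros = 0
--     noOfOnes = 0
--
--     for i in input:
--         if i == '0':
--             noOfZeros += 1
--         elif i == '1':
--             noOfOnes += 1
--
--     return noOfZeros, noOfOnes
--
-- def buildFrames(input, frameSize):
--     output = []
--     for i in range(0, len(input), frameSize):
--         output.append(input[i:i+frameSize])
--     return output
--
-- def vrcdecode(binaryInputString: str, dataWordFrameSize):
--     frames = buildFrames(binaryInputString, dataWordFrameSize+1)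
--     errorFound = False
--     output = ""
--     for i in frames:
--         #  Even Parity VRC
--         _, noOfOnes = CountOnesZeros(i)
--         i = i[:-1]
--         output += i
--         if noOfOnes % 2 == 1:
--             errorFound = True
--
--     return output, errorFound
-- ===== SOURCE B (Python) =====
-- def vrcdecode(binaryInputString: str, dataWordFrameSize):
--     # Single flat pass: no frames list; keep a running '1'-count and in-frame position.
--     fs = dataWordFrameSize + 1
--     out = []
--     ones = 0
--     pos = 0
--     errorFound = False
--     for ch in binaryInputString:
--         if ch == '1':
--             ones += 1
--         pos += 1
--         if pos == fs:
--             if ones % 2 == 1: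
--                 errorFound = True
--             ones = 0
--             pos = 0
--         else:
--             out.append(ch)
--     if pos != 0:
--         # partial final frame: its last char is the parity bit
--         out.pop()
--         if ones % 2 == 1:
--             errorFound = True
--     return "".join(out), errorFound
-- ===== Notes on version B (the rewrite author's own statement) =====
-- stated objective: alternative
-- what changed: Replaces the build-frames-list + per-frame recount-and-slice decomposition with a single flat pass over the characters keeping a running '1'-count and in-frame position, with no intermediate frames list.
-- outside the precondition, e.g. on vrcdecode('1101', -3): A returns ('', False), B returns ('110', True); on vrcdecode('10', -1): A raises ValueError, B returns ('1', True)
import Mathlib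
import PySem

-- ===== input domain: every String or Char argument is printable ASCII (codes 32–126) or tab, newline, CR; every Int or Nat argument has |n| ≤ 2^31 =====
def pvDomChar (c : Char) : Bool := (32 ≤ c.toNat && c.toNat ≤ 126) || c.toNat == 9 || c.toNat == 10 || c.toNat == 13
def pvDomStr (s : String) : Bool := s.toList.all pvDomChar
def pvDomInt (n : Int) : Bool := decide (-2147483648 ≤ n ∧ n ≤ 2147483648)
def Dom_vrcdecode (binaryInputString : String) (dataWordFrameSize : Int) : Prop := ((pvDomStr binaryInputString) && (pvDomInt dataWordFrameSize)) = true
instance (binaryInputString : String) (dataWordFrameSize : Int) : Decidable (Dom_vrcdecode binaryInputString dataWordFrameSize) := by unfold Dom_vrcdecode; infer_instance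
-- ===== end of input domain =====

-- B replaces A's build-frames-list + per-frame recount/slice decomposition with one flat pass
-- keeping a running '1'-count and in-frame position (no intermediate frames list).


-- ===== PORT A =====
def countOnesZeros (input : List Char) : Int × Int :=
  input.foldl (fun (acc : Int × Int) i =>
    if i = '0' then (acc.1 + 1, acc.2)
    else if i = '1' then (acc.1, acc.2 + 1)
    else acc) (0, 0)

def buildFrames (input : List Char) (frameSize : Int) : List (List Char) :=
  (PySem.List.pyRange 0 (input.length : Int) frameSize).foldl
    (fun output i => output ++ [PySem.List.slice input (some i) (some (i + frameSize))]) []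

def vrcdecode (binaryInputString : String) (dataWordFrameSize : Int) : String × Bool :=
  let frames := buildFrames binaryInputString.toList (dataWordFrameSize + 1)
  -- state (errorFound, output); Python's `output += i; if noOfOnes % 2 == 1: errorFound = True`
  let r := frames.foldl (fun (acc : Bool × List Char) i =>
      let noOfOnes := (countOnesZeros i).2
      let i' := PySem.List.slice i none (some (-1))   -- i[:-1]
      (if PySem.Int.mod noOfOnes 2 = 1 then true else acc.1, acc.2 ++ i')) (false, [])
  (String.ofList r.2, r.1)

-- ===== PORT B =====
-- loop body of Source B, state (out, ones, pos, errorFound)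
def altStep (fs : Int) (st : List Char × Int × Int × Bool) (ch : Char) : List Char × Int × Int × Bool :=
  let ones := if ch = '1' then st.2.1 + 1 else st.2.1
  let pos := st.2.2.1 + 1
  if pos = fs then
    (st.1, 0, 0, if PySem.Int.mod ones 2 = 1 then true else st.2.2.2)
  else
    (st.1 ++ [ch], ones, pos, st.2.2.2)

def vrcdecode_alt (binaryInputString : String) (dataWordFrameSize : Int) : String × Bool :=
  let fs := dataWordFrameSize + 1
  let st := binaryInputString.toList.foldl (altStep fs) ([], 0, 0, false)
  if st.2.2.1 ≠ 0 then
    -- partial final frame: out.pop() (out is nonempty whenever pos ≠ 0), then parity-check it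
    (String.ofList st.1.dropLast, if PySem.Int.mod st.2.1 2 = 1 then true else st.2.2.2)
  else
    (String.ofList st.1, st.2.2.2)

-- ===== PRECONDITION & SPEC =====
-- Pre_ restricts to the natural domain of nonnegative frame sizes: at dataWordFrameSize = -1 A
-- raises ValueError (range step 0), and for smaller values A's ("", False) is an artefact of an
-- empty range(0, n, step<0) which B does not mimic.
def Pre_vrcdecode (binaryInputString : String) (dataWordFrameSize : Int) : Prop :=
  0 ≤ dataWordFrameSize
instance (binaryInputString : String) (dataWordFrameSize : Int) : Decidable (Pre_vrcdecode binaryInputString dataWordFrameSize) := by unfold Pre_vrcdecode; infer_instance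

def pvWitness_vrcdecode : String × Int := ("1011", 3)

def Spec_vrcdecode (binaryInputString : String) (dataWordFrameSize : Int) (out : String × Bool) : Prop := out = vrcdecode_alt binaryInputString dataWordFrameSize
instance (binaryInputString : String) (dataWordFrameSize : Int) (out : String × Bool) : Decidable (Spec_vrcdecode binaryInputString dataWordFrameSize out) := by unfold Spec_vrcdecode; infer_instance

-- ===== CLAIM (what is proved, stated in full; the proofs are below) =====
def Claim_equal_vrcdecode : Prop := ∀ (binaryInputString : String) (dataWordFrameSize : Int), Dom_vrcdecode binaryInputString dataWordFrameSize → Pre_vrcdecode binaryInputString dataWordFrameSize → Spec_vrcdecode binaryInputString dataWordFrameSize (vrcdecode binaryInputString dataWordFrameSize)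

-- ===== LEMMAS AND PROOFS =====

-- number of '1' characters, as an Int
def cnt1 (c : List Char) : Int := (c.countP (· == '1') : Int)

theorem countOnesZeros_snd (c : List Char) : ∀ (z o : Int),
    (c.foldl (fun (acc : Int × Int) i =>
      if i = '0' then (acc.1 + 1, acc.2)
      else if i = '1' then (acc.1, acc.2 + 1)
      else acc) (z, o)).2 = o + cnt1 c := by
  induction c with
  | nil => intro z o; simp [cnt1]
  | cons x xs ih =>
    intro z o
    simp only [List.foldl_cons, cnt1, List.countP_cons]
    by_cases h0 : x = '0'
    · subst h0; simp [ih, cnt1]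
    · by_cases h1 : x = '1'
      · subst h1; rw [if_neg (by decide), if_pos rfl, ih]; simp [cnt1]; ring
      · rw [if_neg h0, if_neg h1, ih]; simp [cnt1, h1]

-- chunks of size k+1
def chunks1 (k : Nat) : List Char → List (List Char)
  | [] => []
  | x :: xs => (x :: xs.take k) :: chunks1 k (xs.drop k)
termination_by l => l.length
decreasing_by simp

theorem pyRange_pos_nil {a b s : Int} (hs : 0 < s) (h : b ≤ a) :
    PySem.List.pyRange a b s = [] := by
  rw [PySem.List.pyRange_of_pos _ _ hs]
  simp [show ¬ a < b by omega]

theorem pyRange_pos_cons {a b s : Int} (hs : 0 < s) (hab : a < b) :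
    PySem.List.pyRange a b s = a :: PySem.List.pyRange (a + s) b s := by
  rw [PySem.List.pyRange_of_pos _ _ hs, PySem.List.pyRange_of_pos _ _ hs]
  have hcount : (if a < b then ((b - a + s - 1) / s).toNat else 0)
      = ((b - a - 1) / s).toNat + 1 := by
    rw [if_pos hab]
    have h1 : b - a + s - 1 = (b - a - 1) + 1 * s := by ring
    rw [h1, Int.add_mul_ediv_right _ _ (by omega : s ≠ 0)]
    have h2 : 0 ≤ (b - a - 1) / s := Int.ediv_nonneg (by omega) (by omega)
    omega
  have htail : (if a + s < b then ((b - (a + s) + s - 1) / s).toNat else 0)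
      = ((b - a - 1) / s).toNat := by
    by_cases h2 : a + s < b
    · rw [if_pos h2]
      have h3 : b - (a + s) + s - 1 = b - a - 1 := by ring
      rw [h3]
    · rw [if_neg h2]
      have h4 : (b - a - 1) / s = 0 := Int.ediv_eq_zero_of_lt (by omega) (by omega)
      omega
  rw [hcount, htail, List.range_succ_eq_map]
  simp only [List.map_cons, List.map_map, Nat.cast_zero, mul_zero, add_zero]
  congr 1
  apply List.map_congr_left
  intro k _
  simp [Function.comp]
  ring

theorem slice_chunk (input : List Char) (off fs : Int) (hoff : 0 ≤ off) (hfs : 0 ≤ fs) :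
    PySem.List.slice input (some off) (some (off + fs))
      = (input.drop off.toNat).take fs.toNat := by
  rw [PySem.List.slice_toNat input hoff (by omega)]
  congr 1
  omega

theorem bf_aux (fs : Int) (hfs : 1 ≤ fs) : ∀ (n : Nat) (rest input : List Char) (off : Int)
    (_ : 0 ≤ off) (_ : rest = input.drop off.toNat) (_ : rest.length ≤ n)
    (acc : List (List Char)),
    (PySem.List.pyRange off (input.length : Int) fs).foldl
      (fun output i => output ++ [PySem.List.slice input (some i) (some (i + fs))]) acc
      = acc ++ chunks1 (fs.toNat - 1) rest := by
  intro n
  induction n with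
  | zero =>
    intro rest input off hoff hrest hlen acc
    have h0 : rest = [] := List.eq_nil_of_length_eq_zero (by omega)
    subst h0
    have hlen2 : input.length ≤ off.toNat := by
      by_contra h
      have := congrArg List.length hrest
      simp [List.length_drop] at this
      omega
    rw [pyRange_pos_nil (by omega) (by omega : (input.length : Int) ≤ off)]
    simp [chunks1]
  | succ n ih =>
    intro rest input off hoff hrest hlen acc
    cases hr : rest with
    | nil =>
      subst hr
      have hlen2 : input.length ≤ off.toNat := by
        by_contra h
        have := congrArg List.length hrest
        simp [List.length_drop] at this
        omega
      rw [pyRange_pos_nil (by omega) (by omega : (input.length : Int) ≤ off)]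
      simp [chunks1]
    | cons x xs =>
      subst hr
      have hrl : (x :: xs).length = input.length - off.toNat := by
        rw [hrest]; simp
      have hoff_lt : off.toNat < input.length := by simp at hrl; omega
      rw [pyRange_pos_cons (by omega) (by exact_mod_cast by omega : off < (input.length : Int))]
      rw [List.foldl_cons]
      rw [ih (xs.drop (fs.toNat - 1)) input (off + fs) (by omega)
          (by rw [show (off + fs).toNat = off.toNat + fs.toNat by omega,
                  ← List.drop_drop, ← hrest]
              cases hf : fs.toNat with
              | zero => omega
              | succ m => simp [hf, List.drop_succ_cons])
          (by simp at hlen ⊢; omega)]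
      rw [slice_chunk input off fs hoff (by omega), ← hrest]
      have hch : chunks1 (fs.toNat - 1) (x :: xs)
          = (x :: xs.take (fs.toNat - 1)) :: chunks1 (fs.toNat - 1) (xs.drop (fs.toNat - 1)) := by
        simp only [chunks1]
      rw [hch]
      have htk : (x :: xs).take fs.toNat = x :: xs.take (fs.toNat - 1) := by
        cases hf : fs.toNat with
        | zero => omega
        | succ m => simp [hf]
      rw [htk, List.append_assoc, List.singleton_append]

-- if no reset happens, B's loop just appends and counts
theorem altStep_run_partial (fs : Int) : ∀ (c out : List Char) (ones pos : Int) (err : Bool),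
    0 ≤ pos → pos + c.length < fs →
    c.foldl (altStep fs) (out, ones, pos, err)
      = (out ++ c, ones + cnt1 c, pos + c.length, err) := by
  intro c
  induction c with
  | nil => intro out ones pos err h1 h2; simp [cnt1]
  | cons x xs ih =>
    intro out ones pos err h1 h2
    simp only [List.foldl_cons, altStep]
    have hne : ¬ (pos + 1 = fs) := by simp at h2; omega
    simp only [hne, if_false]
    rw [ih (out ++ [x]) _ (pos + 1) err (by omega) (by simp at h2 ⊢; omega)]
    simp at h2 ⊢
    constructor
    · by_cases hx : x = '1' <;> simp [hx, cnt1, List.countP_cons] <;> push_cast <;> ring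
    · omega

-- a full frame: B's loop strips its last char, resets, and records its parity
theorem altStep_run_full (fs : Int) (hfs : 1 ≤ fs) (c : List Char)
    (hc : (c.length : Int) = fs) (out : List Char) (err : Bool) :
    c.foldl (altStep fs) (out, 0, 0, err)
      = (out ++ c.dropLast, 0, 0, if PySem.Int.mod (cnt1 c) 2 = 1 then true else err) := by
  have hne : c ≠ [] := by intro h; subst h; simp at hc; omega
  obtain ⟨ys, y, hy⟩ : ∃ ys y, c = ys ++ [y] :=
    ⟨c.dropLast, c.getLast hne, (List.dropLast_append_getLast hne).symm⟩
  subst hy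
  have hc' : (ys.length : Int) + 1 = fs := by simp at hc; omega
  rw [List.foldl_append]
  rw [altStep_run_partial fs ys out 0 0 err le_rfl (by omega)]
  simp only [List.foldl_cons, List.foldl_nil, altStep, zero_add]
  rw [if_pos hc']
  have hones : (if y = '1' then cnt1 ys + 1 else cnt1 ys) = cnt1 (ys ++ [y]) := by
    by_cases hy1 : y = '1' <;> simp [hy1, cnt1]
  rw [hones, List.dropLast_concat]

-- B's finishing step applied to a loop state
def bFinish (st : List Char × Int × Int × Bool) : Bool × List Char :=
  if st.2.2.1 ≠ 0 then
    (if PySem.Int.mod st.2.1 2 = 1 then true else st.2.2.2, st.1.dropLast)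
  else
    (st.2.2.2, st.1)

-- main loop equivalence: A's fold over the chunks = B's flat pass + finish
theorem main_loop (fs : Int) (hfs : 1 ≤ fs) : ∀ (n : Nat) (l : List Char), l.length ≤ n →
    ∀ (out : List Char) (err : Bool),
    (chunks1 (fs.toNat - 1) l).foldl (fun (acc : Bool × List Char) i =>
        (if PySem.Int.mod (countOnesZeros i).2 2 = 1 then true else acc.1,
         acc.2 ++ PySem.List.slice i none (some (-1)))) (err, out)
      = bFinish (l.foldl (altStep fs) (out, 0, 0, err)) := by
  intro n
  induction n with
  | zero =>
    intro l hl out err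
    have h0 : l = [] := List.eq_nil_of_length_eq_zero (by omega)
    subst h0
    simp [chunks1, bFinish]
  | succ n ih =>
    intro l hl out err
    cases hL : l with
    | nil => simp [chunks1, bFinish]
    | cons x xs =>
      subst hL
      simp only [chunks1]
      have htk : x :: xs.take (fs.toNat - 1) = (x :: xs).take fs.toNat := by
        cases hf : fs.toNat with
        | zero => omega
        | succ m => simp [hf]
      have hdr : xs.drop (fs.toNat - 1) = (x :: xs).drop fs.toNat := by
        cases hf : fs.toNat with
        | zero => omega
        | succ m => simp [hf]
      rw [htk, hdr, List.foldl_cons]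
      have hcz : (countOnesZeros ((x :: xs).take fs.toNat)).2 = cnt1 ((x :: xs).take fs.toNat) := by
        have := countOnesZeros_snd ((x :: xs).take fs.toNat) 0 0
        simpa [countOnesZeros] using this
      rw [PySem.List.slice_to_neg_one, hcz]
      by_cases hbig : fs.toNat ≤ (x :: xs).length
      · -- full first frame
        have hsplit : (x :: xs) = (x :: xs).take fs.toNat ++ (x :: xs).drop fs.toNat :=
          (List.take_append_drop _ _).symm
        conv_rhs => rw [hsplit]
        rw [List.foldl_append]
        have hlen1 : ((((x :: xs).take fs.toNat).length : Nat) : Int) = fs := by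
          rw [List.length_take]
          have hmin : min fs.toNat (x :: xs).length = fs.toNat := by omega
          rw [hmin]; omega
        rw [altStep_run_full fs hfs _ hlen1 out err]
        rw [ih _ (by rw [List.length_drop]; omega)]
      · -- partial (final) frame
        have hlt : (x :: xs).length < fs.toNat := by omega
        have htake : (x :: xs).take fs.toNat = x :: xs := List.take_of_length_le (by omega)
        have hdrop : (x :: xs).drop fs.toNat = [] := List.drop_of_length_le (by omega)
        rw [htake, hdrop]
        simp only [chunks1, List.foldl_nil]
        rw [altStep_run_partial fs (x :: xs) out 0 0 err le_rfl (by
          have hx : ((x :: xs).length : Int) < fs := by omega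
          omega)]
        simp only [bFinish, zero_add]
        rw [if_pos (show (((x :: xs).length : Int) ≠ 0) by simp; omega)]
        simp [List.dropLast_append_of_ne_nil]

theorem vrcdecode_eq (s : String) (d : Int) (hd : 0 ≤ d) :
    vrcdecode s d = vrcdecode_alt s d := by
  have hfs : (1 : Int) ≤ d + 1 := by omega
  have hbf : buildFrames s.toList (d + 1) = chunks1 ((d + 1).toNat - 1) s.toList := by
    unfold buildFrames
    have := bf_aux (d + 1) hfs s.toList.length s.toList s.toList 0 le_rfl (by simp) le_rfl []
    simpa using this
  simp only [vrcdecode, vrcdecode_alt]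
  rw [hbf, main_loop (d + 1) hfs s.toList.length s.toList le_rfl [] false]
  by_cases hp : (s.toList.foldl (altStep (d + 1)) ([], 0, 0, false)).2.2.1 ≠ 0
  · simp [bFinish, hp]
  · simp [bFinish, hp]

-- ===== VERDICT (by name: the statement is the Claim_ definition above) =====
theorem vrcdecode_spec : Claim_equal_vrcdecode := by
  intro s d _ hpre
  unfold Spec_vrcdecode
  exact vrcdecode_eq s d hpre
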